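-- pv_equiv track=rewrite | github.com/chuanyin888/ai-smart-clipping-tool | scripts/download_youtube.py | decide_lang_groups
-- ===== SOURCE A (Python) =====
-- PREFERRED_SUBS = [
--     'en,en-US,en-orig',
--     'zh-Hans,zh-CN,zh',
-- ]
--
-- def decide_lang_groups(listing: str, requested: str = 'auto') -> list[str]:
--     if requested and requested != 'auto':
--         return [requested]
--     chosen: list[str] = []
--     if any(k in listing for k in ['\nen ', 'english', 'en-orig', 'en-us']):
--         chosen.append('en,en-US,en-orig')
--     if any(k in listing for k in ['zh-hans', 'zh-cn', 'chinese (simplified)', ' chinese']):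
--         chosen.append('zh-Hans,zh-CN,zh')
--     for item in PREFERRED_SUBS:
--         if item not in chosen:
--             chosen.append(item)
--     return chosen
-- ===== SOURCE B (Python) =====
-- def decide_lang_groups(listing: str, requested: str = 'auto') -> list[str]:
--     if requested and requested != 'auto':
--         return [requested]
--     en_found = any(k in listing for k in ['\nen ', 'english', 'en-orig', 'en-us'])
--     zh_found = any(k in listing for k in ['zh-hans', 'zh-cn', 'chinese (simplified)', ' chinese'])
--     if zh_found and not en_found:
--         return ['zh-Hans,zh-CN,zh', 'en,en-US,en-orig']
--     return ['en,en-US,en-orig', 'zh-Hans,zh-CN,zh']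
-- ===== Notes on version B (the rewrite author's own statement) =====
-- stated objective: simpler
-- what changed: A accumulates matches into a list and then runs a dedup-append loop over PREFERRED_SUBS; B observes both preferred groups are always returned and directly returns one of the two fixed orderings, dropping the accumulator and dedup loop.
import Mathlib
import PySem

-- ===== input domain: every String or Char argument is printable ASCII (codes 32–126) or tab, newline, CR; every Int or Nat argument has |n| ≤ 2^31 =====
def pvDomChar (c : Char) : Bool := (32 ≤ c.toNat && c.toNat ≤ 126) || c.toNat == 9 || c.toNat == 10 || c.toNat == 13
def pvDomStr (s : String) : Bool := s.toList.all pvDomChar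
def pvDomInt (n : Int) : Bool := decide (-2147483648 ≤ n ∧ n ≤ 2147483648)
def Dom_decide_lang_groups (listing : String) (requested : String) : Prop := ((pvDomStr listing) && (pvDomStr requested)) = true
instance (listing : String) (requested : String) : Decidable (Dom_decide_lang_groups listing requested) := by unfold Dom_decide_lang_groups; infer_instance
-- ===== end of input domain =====

-- B drops A's accumulator and dedup-append loop: since both preferred groups are always returned, B directly returns one of the two fixed orderings (simpler).


-- ===== PORT A =====
def PREFERRED_SUBS : List String := ["en,en-US,en-orig", "zh-Hans,zh-CN,zh"]

def decide_lang_groups (listing : String) (requested : String) : List String :=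
  if requested ≠ "" ∧ requested ≠ "auto" then [requested]
  else
    let chosen : List String := []
    let chosen := if (["\nen ", "english", "en-orig", "en-us"].any
        (fun k => PySem.Str.isIn k listing)) then chosen ++ ["en,en-US,en-orig"] else chosen
    let chosen := if (["zh-hans", "zh-cn", "chinese (simplified)", " chinese"].any
        (fun k => PySem.Str.isIn k listing)) then chosen ++ ["zh-Hans,zh-CN,zh"] else chosen
    PREFERRED_SUBS.foldl (fun acc item => if item ∈ acc then acc else acc ++ [item]) chosen

-- ===== PORT B =====
def decide_lang_groups_alt (listing : String) (requested : String) : List String :=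
  if requested ≠ "" ∧ requested ≠ "auto" then [requested]
  else
    let en_found := ["\nen ", "english", "en-orig", "en-us"].any
        (fun k => PySem.Str.isIn k listing)
    let zh_found := ["zh-hans", "zh-cn", "chinese (simplified)", " chinese"].any
        (fun k => PySem.Str.isIn k listing)
    if zh_found && !en_found then ["zh-Hans,zh-CN,zh", "en,en-US,en-orig"]
    else ["en,en-US,en-orig", "zh-Hans,zh-CN,zh"]

-- ===== PRECONDITION & SPEC =====
def Spec_decide_lang_groups (listing : String) (requested : String) (out : List String) : Prop := out = decide_lang_groups_alt listing requested
instance (listing : String) (requested : String) (out : List String) : Decidable (Spec_decide_lang_groups listing requested out) := by unfold Spec_decide_lang_groups; infer_instance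

-- ===== CLAIM (what is proved, stated in full; the proofs are below) =====
def Claim_equal_decide_lang_groups : Prop := ∀ (listing : String) (requested : String), Dom_decide_lang_groups listing requested → Spec_decide_lang_groups listing requested (decide_lang_groups listing requested)

-- ===== LEMMAS AND PROOFS =====

-- ===== VERDICT (by name: the statement is the Claim_ definition above) =====
theorem decide_lang_groups_spec : Claim_equal_decide_lang_groups := by
  intro listing requested _
  unfold Spec_decide_lang_groups decide_lang_groups decide_lang_groups_alt
  by_cases hreq : requested ≠ "" ∧ requested ≠ "auto"
  · simp [hreq]
  · simp only [hreq, if_false]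
    cases hen : (["\nen ", "english", "en-orig", "en-us"].any
        (fun k => PySem.Str.isIn k listing)) <;>
    cases hzh : (["zh-hans", "zh-cn", "chinese (simplified)", " chinese"].any
        (fun k => PySem.Str.isIn k listing)) <;>
      simp [PREFERRED_SUBS, List.foldl]
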